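-- pv_equiv track=rewrite | github.com/jvieira42/SPLN-TP | TP3/processor.py | rima
-- ===== SOURCE A (Python) =====
-- def rima(p1,p2):
--     count = 0
--     flag = 1
--     for c,d in zip(reversed(p1),reversed(p2)):
--         if(c==d and flag == 1):
--             count+=1
--         else:
--             flag = 0
--     if(count >= 2):
--         return 1
--     else:
--         return 0
-- ===== SOURCE B (Python) =====
-- def rima(p1, p2):
--     # Closed-form: rhyme iff both words have >= 2 chars and their last two chars match.
--     if len(p1) >= 2 and len(p2) >= 2 and p1[-1] == p2[-1] and p1[-2] == p2[-2]:
--         return 1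
--     return 0
-- ===== Notes on version B (the rewrite author's own statement) =====
-- stated objective: simpler
-- what changed: Replaced the reversed-zip counting loop with flag state by a direct closed-form check that both strings have length >= 2 and their last two characters match.
import Mathlib
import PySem

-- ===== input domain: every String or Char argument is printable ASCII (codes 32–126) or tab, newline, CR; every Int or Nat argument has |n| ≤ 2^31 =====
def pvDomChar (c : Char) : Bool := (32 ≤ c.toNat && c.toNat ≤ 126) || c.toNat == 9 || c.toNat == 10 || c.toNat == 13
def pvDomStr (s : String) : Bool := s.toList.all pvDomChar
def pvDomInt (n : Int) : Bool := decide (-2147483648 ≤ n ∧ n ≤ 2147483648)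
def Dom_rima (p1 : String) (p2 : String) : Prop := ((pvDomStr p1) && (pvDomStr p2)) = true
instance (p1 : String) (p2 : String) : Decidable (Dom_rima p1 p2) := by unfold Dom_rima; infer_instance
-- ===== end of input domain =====

-- B replaces A's reversed-zip counting loop by a closed-form last-two-characters check (simpler).


-- ===== PORT A =====
-- the for-loop over zip(reversed(p1), reversed(p2)) with state (count, flag)
def rimaLoop : List (Char × Char) → Int × Int → Int × Int
  | [], st => st
  | (c, d) :: rest, (count, flag) =>
      rimaLoop rest (if c = d ∧ flag = 1 then (count + 1, flag) else (count, 0))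

def rima (p1 : String) (p2 : String) : Int :=
  let st := rimaLoop (p1.toList.reverse.zip p2.toList.reverse) (0, 1)
  if st.1 ≥ 2 then 1 else 0

-- ===== PORT B =====
def rima_alt (p1 : String) (p2 : String) : Int :=
  if 2 ≤ PySem.Str.len p1 ∧ 2 ≤ PySem.Str.len p2 ∧
     PySem.Str.pyGet? p1 (-1) = PySem.Str.pyGet? p2 (-1) ∧
     PySem.Str.pyGet? p1 (-2) = PySem.Str.pyGet? p2 (-2) then 1 else 0

-- ===== PRECONDITION & SPEC =====
def Spec_rima (p1 : String) (p2 : String) (out : Int) : Prop := out = rima_alt p1 p2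
instance (p1 : String) (p2 : String) (out : Int) : Decidable (Spec_rima p1 p2 out) := by unfold Spec_rima; infer_instance

-- ===== CLAIM (what is proved, stated in full; the proofs are below) =====
def Claim_equal_rima : Prop := ∀ (p1 : String) (p2 : String), Dom_rima p1 p2 → Spec_rima p1 p2 (rima p1 p2)

-- ===== LEMMAS AND PROOFS =====

-- once the flag is 0, the count never changes
theorem rimaLoop_flag0 : ∀ (l : List (Char × Char)) (c : Int), rimaLoop l (c, 0) = (c, 0) := by
  intro l
  induction l with
  | nil => intro c; rfl
  | cons p rest ih =>
      intro c
      obtain ⟨x, y⟩ := p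
      simp [rimaLoop, ih]

-- the count is monotone
theorem rimaLoop_fst_ge : ∀ (l : List (Char × Char)) (c f : Int), c ≤ (rimaLoop l (c, f)).1 := by
  intro l
  induction l with
  | nil => intro c f; exact le_refl c
  | cons p rest ih =>
      intro c f
      obtain ⟨x, y⟩ := p
      by_cases h : x = y ∧ f = 1
      · simp only [rimaLoop, if_pos h]
        exact le_trans (by omega) (ih (c + 1) f)
      · simp only [rimaLoop, if_neg h]
        exact ih c 0

-- last-two-element access of l via its reverse
theorem pyGet_neg_of_reverse {l : List Char} {a b : Char} {t : List Char}
    (h : l.reverse = a :: b :: t) :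
    PySem.List.pyGet? l (-1) = some a ∧ PySem.List.pyGet? l (-2) = some b := by
  have hl : l = (a :: b :: t).reverse := by
    have := congrArg List.reverse h
    simpa using this
  subst hl
  constructor
  · rw [PySem.List.pyGet?_neg_one]
    simp [List.getLast?_reverse]
  · have hlen : 2 ≤ ((a :: b :: t).reverse).length := by simp
    rw [PySem.List.pyGet?_neg_ofNat _ 2 (by omega) hlen]
    have : (a :: b :: t).reverse = (t.reverse ++ [b]) ++ [a] := by simp
    rw [this]
    have hlen2 : ((t.reverse ++ [b]) ++ [a]).length - 2 = t.length := by simp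
    rw [hlen2]
    rw [List.getElem?_append_left (by simp)]
    rw [show t.length = t.reverse.length + 0 from by simp]
    rw [List.getElem?_append_right (by omega)]
    simp

-- the core equivalence, over the reversed character lists
theorem rima_core (l1 l2 : List Char) :
    (if (rimaLoop (l1.reverse.zip l2.reverse) (0, 1)).1 ≥ 2 then (1 : Int) else 0) =
    (if 2 ≤ l1.length ∧ 2 ≤ l2.length ∧
        PySem.List.pyGet? l1 (-1) = PySem.List.pyGet? l2 (-1) ∧
        PySem.List.pyGet? l1 (-2) = PySem.List.pyGet? l2 (-2) then (1 : Int) else 0) := by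
  match h1 : l1.reverse, h2 : l2.reverse with
  | [], r2 =>
      have : l1.length = 0 := by
        have := congrArg List.length h1; simpa using this
      simp [rimaLoop, this]
  | a :: t1, [] =>
      have : l2.length = 0 := by
        have := congrArg List.length h2; simpa using this
      cases t1 <;> simp [rimaLoop, this]
  | [a], c :: t2 =>
      have : l1.length = 1 := by
        have := congrArg List.length h1; simpa using this
      have hle : (rimaLoop [(a, c)] ((0 : Int), (1 : Int))).1 ≤ 1 := by
        by_cases hac : a = c <;> simp [rimaLoop, hac]
      simp only [List.zip_cons_cons, List.zip_nil_left]
      rw [if_neg (by omega), if_neg (by omega)]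
  | a :: b :: t1, [c] =>
      have : l2.length = 1 := by
        have := congrArg List.length h2; simpa using this
      have hle : (rimaLoop [(a, c)] ((0 : Int), (1 : Int))).1 ≤ 1 := by
        by_cases hac : a = c <;> simp [rimaLoop, hac]
      simp only [List.zip_cons_cons, List.zip_nil_right]
      rw [if_neg (by omega), if_neg (by omega)]
  | a :: b :: t1, c :: d :: t2 =>
      obtain ⟨hg1a, hg1b⟩ := pyGet_neg_of_reverse h1
      obtain ⟨hg2a, hg2b⟩ := pyGet_neg_of_reverse h2
      have hl1 : 2 ≤ l1.length := by
        have := congrArg List.length h1; simp at this; omega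
      have hl2 : 2 ≤ l2.length := by
        have := congrArg List.length h2; simp at this; omega
      simp only [List.zip_cons_cons]
      by_cases hac : a = c
      · by_cases hbd : b = d
        · subst hac; subst hbd
          have h2le : (2 : Int) ≤ (rimaLoop (t1.zip t2) ((2 : Int), (1 : Int))).1 :=
            rimaLoop_fst_ge _ 2 1
          rw [if_pos (by
            simpa [rimaLoop] using h2le)]
          rw [if_pos ⟨hl1, hl2, by rw [hg1a, hg2a], by rw [hg1b, hg2b]⟩]
        · subst hac
          have : rimaLoop ((a, a) :: (b, d) :: t1.zip t2) ((0 : Int), (1 : Int)) = (1, 0) := by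
            simp [rimaLoop, hbd, rimaLoop_flag0]
          simp only [this]
          rw [if_neg (by omega)]
          rw [if_neg (by
            rintro ⟨-, -, -, hEq⟩
            rw [hg1b, hg2b] at hEq
            exact hbd (Option.some.inj hEq))]
      · have : rimaLoop ((a, c) :: (b, d) :: t1.zip t2) ((0 : Int), (1 : Int)) = (0, 0) := by
          simp [rimaLoop, hac, rimaLoop_flag0]
        simp only [this]
        rw [if_neg (by omega)]
        rw [if_neg (by
          rintro ⟨-, -, hEq, -⟩
          rw [hg1a, hg2a] at hEq
          exact hac (Option.some.inj hEq))]

-- ===== VERDICT (by name: the statement is the Claim_ definition above) =====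
theorem rima_spec : Claim_equal_rima := by
  intro p1 p2 _
  unfold Spec_rima rima rima_alt
  have := rima_core p1.toList p2.toList
  simpa using this
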